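-- pv_equiv track=rewrite | github.com/JamesStewart314/Python-Solo-Projects | Prime_Number_Tools.py | get_prime_ordinal_pos
-- ===== SOURCE A (Python) =====
-- import itertools
-- from typing import Generator
--
-- def check_primality(number: int, /) -> bool:
--
--     """
--
--      The function checks if the given number is prime or not.
--
--     :param number: An positive integer number.
--     :return: Returns a boolean ("True" if the number is prime, "False" if it's not.)
--
--     """
--
--     if not isinstance(number, int) or number <= 0:
--         raise ValueError("To check primality, the number must be an positive integer.")
--
--     if number == 1:
--         return False
--     elif number == 2:
--         return True
--     elif number % 2 == 0:
--         return False
--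
--     for i in range(3, int(number ** (1 / 2)) + 1):
--         if number % i == 0:
--             return False
--
--     return True
--
-- def prime_generator() -> Generator[int, None, None]:
--
--     """
--
--      The function creates a generator of sequential prime numbers.
--
--     :return: Returns a generator object to form prime numbers.
--
--     """
--
--     return (number for number in itertools.count(start=2) if check_primality(number))
--
-- def get_prime_ordinal_pos(prime_number: int, /) -> int | None:
--
--     """
--
--      Takes an integer and returns "None" if the value is not prime,
--     or returns the ordinal position of the corresponding prime number.
--     (e.g.: 2 ~> 1 ; 3 ~> 2 ; 4 ~> None ; 5 ~> 3 ... etc)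
--
--     :param prime_number: Prime integer whose ordinal position wants to be calculated.
--     :return: an integer corresponding to the ordinal position of the prime or "None"
--     if the given integer is not a prime number.
--
--     """
--
--     if not isinstance(prime_number, int):
--         raise TypeError("The \"prime_number\" parameter must be a integer type.")
--
--     if prime_number <= 0:
--         raise ValueError("It is not possible to provide a zero/negative number.")
--
--     primes_generator: Generator[int, None, None] = prime_generator()
--
--     temp_prime: int = next(primes_generator)
--     temp_ordinal_pos: int = 1
--
--     while temp_prime < prime_number:
--         temp_prime = next(primes_generator)
--         temp_ordinal_pos += 1
--
--     if temp_prime == prime_number: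
--         return temp_ordinal_pos
--     else:
--         return None
-- ===== SOURCE B (Python) =====
-- def get_prime_ordinal_pos(prime_number: int, /) -> int | None:
--     # Sieve of Eratosthenes up to prime_number, then count primes <= it.
--     if not isinstance(prime_number, int):
--         raise TypeError("The \"prime_number\" parameter must be a integer type.")
--     if prime_number <= 0:
--         raise ValueError("It is not possible to provide a zero/negative number.")
--     n = prime_number
--     sieve = [True] * (n + 1)
--     sieve[0] = sieve[1] = False
--     for p in range(2, n + 1):
--         for m in range(2 * p, n + 1, p):
--             sieve[m] = False
--     return sum(sieve) if sieve[n] else None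
-- ===== Notes on version B (the rewrite author's own statement) =====
-- stated objective: faster
-- what changed: Replaced the prime-generator that trial-divides every number up to the input with a single Sieve of Eratosthenes array up to the input, answering by one array lookup plus a count of sieve entries.
-- outside the precondition, e.g. on get_prime_ordinal_pos(0): A raises ValueError, B raises ValueError
import Mathlib
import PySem

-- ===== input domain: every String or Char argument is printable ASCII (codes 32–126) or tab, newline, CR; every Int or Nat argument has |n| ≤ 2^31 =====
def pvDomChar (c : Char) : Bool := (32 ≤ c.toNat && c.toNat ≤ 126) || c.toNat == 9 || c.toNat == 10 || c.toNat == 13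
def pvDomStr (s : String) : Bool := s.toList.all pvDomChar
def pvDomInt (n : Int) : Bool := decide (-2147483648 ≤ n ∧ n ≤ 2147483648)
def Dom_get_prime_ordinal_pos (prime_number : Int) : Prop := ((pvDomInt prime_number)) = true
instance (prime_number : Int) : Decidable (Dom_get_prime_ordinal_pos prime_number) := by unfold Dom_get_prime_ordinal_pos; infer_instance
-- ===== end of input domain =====

-- B replaces A's per-number trial division (prime generator scanned up to the input) with a
-- single Sieve of Eratosthenes up to the input; objective: faster (asymptotic).

-- ===== PORT A =====
-- check_primality: trial division.  int(number ** (1/2)) equals Nat.sqrt exactly for the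
-- magnitudes reachable here (|n| ≤ 2^31; float sqrt of such ints truncates to the integer sqrt).
def pvCheckPrimality (number : Nat) : Bool :=
  if number = 1 then false
  else if number = 2 then true
  else if number % 2 = 0 then false
  else
    -- for i in range(3, int(number ** (1/2)) + 1): if number % i == 0: return False
    (List.range' 3 (Nat.sqrt number + 1 - 3)).all (fun i => number % i != 0)

-- the generator + while loop of A: scan candidates 2,3,4,… in order (exactly what the
-- generator does internally); at each prime found, if it is still < n advance the ordinal
-- position, otherwise compare with n.  fuel is only for termination; Bertrand's postulate
-- shows fuel = 2*n never runs out (proved below).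
def pvAloop (n : Nat) : Nat → Int → Nat → Option Int
  | _, _, 0 => none
  | c, pos, fuel + 1 =>
    if pvCheckPrimality c then
      if c < n then pvAloop n (c + 1) (pos + 1) fuel
      else if c = n then some pos else none
    else pvAloop n (c + 1) pos fuel

def get_prime_ordinal_pos (prime_number : Int) : Option Int :=
  if prime_number ≤ 0 then none  -- Python raises ValueError here; excluded by Pre_
  else pvAloop prime_number.toNat 2 1 (2 * prime_number.toNat)

-- ===== PORT B =====
-- sieve = [True]*(n+1); sieve[0] = sieve[1] = False;
-- for p in range(2, n+1): for m in range(2*p, n+1, p): sieve[m] = False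
-- (range(2*p, n+1, p) = List.range' (2*p) (n/p - 1) p : same start, step and element count)
def pvSieve (n : Nat) : Array Bool :=
  (List.range' 2 (n - 1)).foldl
    (fun a p => (List.range' (2 * p) (n / p - 1) p).foldl
      (fun a m => a.setIfInBounds m false) a)
    (((Array.replicate (n + 1) true).setIfInBounds 0 false).setIfInBounds 1 false)

def get_prime_ordinal_pos_alt (prime_number : Int) : Option Int :=
  if prime_number ≤ 0 then none  -- Python raises ValueError here; excluded by Pre_
  else
    let n := prime_number.toNat
    let sieve := pvSieve n
    if sieve[n]! = false then none
    else some (sieve.foldl (fun s b => s + (if b then (1 : Int) else 0)) 0)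

-- ===== PRECONDITION & SPEC =====
-- A raises (ValueError) exactly for prime_number ≤ 0; those inputs are excluded.
def Pre_get_prime_ordinal_pos (prime_number : Int) : Prop := 1 ≤ prime_number
instance (prime_number : Int) : Decidable (Pre_get_prime_ordinal_pos prime_number) := by
  unfold Pre_get_prime_ordinal_pos; infer_instance
def pvWitness_get_prime_ordinal_pos : Int := 7

def Spec_get_prime_ordinal_pos (prime_number : Int) (out : Option Int) : Prop := out = get_prime_ordinal_pos_alt prime_number
instance (prime_number : Int) (out : Option Int) : Decidable (Spec_get_prime_ordinal_pos prime_number out) := by unfold Spec_get_prime_ordinal_pos; infer_instance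

-- ===== CLAIM (what is proved, stated in full; the proofs are below) =====
def Claim_equal_get_prime_ordinal_pos : Prop := ∀ (prime_number : Int), Dom_get_prime_ordinal_pos prime_number → Pre_get_prime_ordinal_pos prime_number → Spec_get_prime_ordinal_pos prime_number (get_prime_ordinal_pos prime_number)

-- ===== LEMMAS AND PROOFS =====

-- number of primes < c
def pvPi (c : Nat) : Nat := (List.range c).countP (fun k => decide (Nat.Prime k))

theorem pvPi_succ (c : Nat) :
    pvPi (c + 1) = pvPi c + (if Nat.Prime c then 1 else 0) := by
  unfold pvPi
  rw [List.range_succ, List.countP_append]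
  by_cases h : Nat.Prime c <;> simp [h]

theorem pvCheck_correct (c : Nat) (hc : 2 ≤ c) :
    pvCheckPrimality c = true ↔ Nat.Prime c := by
  unfold pvCheckPrimality
  split_ifs with h1 h2 h3
  · omega
  · subst h2; simpa using Nat.prime_two
  · simp only [false_iff]
    intro hp
    rcases hp.eq_one_or_self_of_dvd 2 (Nat.dvd_of_mod_eq_zero h3) with h | h <;> omega
  · rw [List.all_eq_true]
    constructor
    · intro hall
      rw [Nat.prime_def_le_sqrt]
      refine ⟨hc, fun m hm2 hms hdvd => ?_⟩
      rcases Nat.lt_or_ge m 3 with hm3 | hm3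
      · have hm : m = 2 := by omega
        subst hm
        exact h3 (Nat.mod_eq_zero_of_dvd hdvd)
      · have hmem : m ∈ List.range' 3 (Nat.sqrt c + 1 - 3) := by
          rw [List.mem_range'_1]
          exact ⟨hm3, by omega⟩
        have := hall m hmem
        simp only [bne_iff_ne, ne_eq] at this
        exact this (Nat.mod_eq_zero_of_dvd hdvd)
    · intro hp i hi
      rw [List.mem_range'_1] at hi
      simp only [bne_iff_ne, ne_eq]
      intro hmod
      have hdvd : i ∣ c := Nat.dvd_of_mod_eq_zero hmod
      rcases hp.eq_one_or_self_of_dvd i hdvd with h | h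
      · omega
      · have hsq : i ≤ Nat.sqrt c := by omega
        have : Nat.sqrt c < c := Nat.sqrt_lt_self (by omega)
        omega

-- A's loop past n: once the candidate exceeds n, the first prime found returns none.
theorem pvAloop_past (n : Nat) :
    ∀ fuel c (pos : Int), 2 ≤ c → n < c →
      (∃ p, Nat.Prime p ∧ c ≤ p ∧ p < c + fuel) →
      pvAloop n c pos fuel = none := by
  intro fuel
  induction fuel with
  | zero =>
    intro c pos _ _ h
    obtain ⟨p, _, h1, h2⟩ := h
    omega
  | succ f ih =>
    intro c pos hc hn h
    obtain ⟨p, hp, hcp, hpf⟩ := h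
    unfold pvAloop
    by_cases hchk : pvCheckPrimality c
    · rw [if_pos hchk, if_neg (by omega), if_neg (by omega)]
    · rw [if_neg hchk]
      apply ih (c + 1) pos (by omega) (by omega)
      have hpc : p ≠ c := by
        intro h; subst h
        exact hchk ((pvCheck_correct p hc).2 hp)
      exact ⟨p, hp, by omega, by omega⟩

-- A's loop invariant while the candidate is ≤ n.
theorem pvAloop_main (n : Nat) (hn : 1 ≤ n) :
    ∀ fuel c (pos : Int), 2 ≤ c → c ≤ n → pos = 1 + (pvPi c : Int) →
      2 * n + 1 ≤ fuel + c →
      pvAloop n c pos fuel = if Nat.Prime n then some (pvPi (n + 1) : Int) else none := by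
  intro fuel
  induction fuel with
  | zero => intro c pos _ _ _ _; omega
  | succ f ih =>
    intro c pos hc hcn hpos hfuel
    unfold pvAloop
    by_cases hchk : pvCheckPrimality c
    · have hcp : Nat.Prime c := (pvCheck_correct c hc).1 hchk
      rw [if_pos hchk]
      by_cases hlt : c < n
      · rw [if_pos hlt]
        apply ih (c + 1) (pos + 1) (by omega) (by omega) ?_ (by omega)
        rw [hpos, pvPi_succ, if_pos hcp]
        push_cast; ring
      · have hceq : c = n := by omega
        rw [if_neg hlt, if_pos hceq]
        subst hceq
        rw [if_pos hcp, hpos, pvPi_succ, if_pos hcp]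
        push_cast; ring_nf
    · have hncp : ¬ Nat.Prime c := fun h => hchk ((pvCheck_correct c hc).2 h)
      rw [if_neg hchk]
      by_cases hlt : c < n
      · exact ih (c + 1) pos (by omega) (by omega)
          (by rw [hpos, pvPi_succ, if_neg hncp]; simp) (by omega)
      · have hceq : c = n := by omega
        subst hceq
        rw [if_neg hncp]
        obtain ⟨p, hp, hlt2, hle2⟩ := Nat.exists_prime_lt_and_le_two_mul c (by omega)
        exact pvAloop_past c f (c + 1) pos (by omega) (by omega) ⟨p, hp, by omega, by omega⟩

-- size is preserved through the in-bounds writes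
theorem pvInner_size (L : List Nat) (a : Array Bool) :
    (L.foldl (fun a m => a.setIfInBounds m false) a).size = a.size := by
  induction L generalizing a with
  | nil => rfl
  | cons x L ih => simp [List.foldl_cons, ih]

theorem pvOuter_size (n : Nat) (P : List Nat) (a : Array Bool) :
    (P.foldl (fun a p => (List.range' (2 * p) (n / p - 1) p).foldl
      (fun a m => a.setIfInBounds m false) a) a).size = a.size := by
  induction P generalizing a with
  | nil => rfl
  | cons p P ih => rw [List.foldl_cons, ih, pvInner_size]

theorem pvSieve_size (n : Nat) : (pvSieve n).size = n + 1 := by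
  unfold pvSieve
  rw [pvOuter_size]
  simp

theorem pvInner_get (L : List Nat) (a : Array Bool) (k : Nat) :
    (L.foldl (fun a m => a.setIfInBounds m false) a)[k]? =
      if k ∈ L ∧ k < a.size then some false else a[k]? := by
  induction L generalizing a with
  | nil => simp
  | cons x L ih =>
    rw [List.foldl_cons, ih (a.setIfInBounds x false) ]
    simp only [Array.size_setIfInBounds, List.mem_cons]
    by_cases hkL : k ∈ L <;> by_cases hks : k < a.size <;> by_cases hx : x = k <;>
      simp [hkL, hks, hx] <;> (intro h; exact absurd h.symm hx)

theorem pvOuter_get (n : Nat) (P : List Nat) (a : Array Bool) (k : Nat) :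
    (P.foldl (fun a p => (List.range' (2 * p) (n / p - 1) p).foldl
      (fun a m => a.setIfInBounds m false) a) a)[k]? =
      if (∃ p ∈ P, k ∈ List.range' (2 * p) (n / p - 1) p) ∧ k < a.size then some false
      else a[k]? := by
  induction P generalizing a with
  | nil => simp
  | cons p P ih =>
    rw [List.foldl_cons, ih, pvInner_size, pvInner_get]
    by_cases hp : k ∈ List.range' (2 * p) (n / p - 1) p <;>
      by_cases hP : ∃ q ∈ P, k ∈ List.range' (2 * q) (n / q - 1) q <;>
      by_cases hks : k < a.size <;>
      simp [hp, hP, hks]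

-- membership in the inner range' is exactly "k is a multiple p*m, 2 ≤ m, k ≤ n"
theorem pvMemInner (n p k : Nat) (hp : 1 ≤ p) :
    k ∈ List.range' (2 * p) (n / p - 1) p ↔ ∃ m, 2 ≤ m ∧ k = p * m ∧ k ≤ n := by
  rw [List.mem_range']
  constructor
  · rintro ⟨i, hi, rfl⟩
    refine ⟨2 + i, by omega, by ring, ?_⟩
    have h1 : 2 + i ≤ n / p := by omega
    have h2 : p * (2 + i) ≤ p * (n / p) := Nat.mul_le_mul_left p h1
    have h3 : p * (n / p) ≤ n := Nat.mul_div_le n p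
    have h4 : p * (2 + i) = 2 * p + p * i := by ring
    omega
  · rintro ⟨m, hm, rfl, hle⟩
    obtain ⟨m', rfl⟩ : ∃ m', m = m' + 2 := ⟨m - 2, by omega⟩
    refine ⟨m', ?_, by ring⟩
    have h1 : m' + 2 ≤ n / p := by
      rw [Nat.le_div_iff_mul_le (by omega)]
      have := Nat.mul_comm p (m' + 2)
      omega
    omega

theorem pvSieve_getElem? (n k : Nat) (hn : 1 ≤ n) (hk : k ≤ n) :
    (pvSieve n)[k]? = some (decide (Nat.Prime k)) := by
  unfold pvSieve
  rw [pvOuter_get]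
  have hsz : k < (((Array.replicate (n + 1) true).setIfInBounds 0 false).setIfInBounds 1
      false).size := by simp; omega
  have hinit : (((Array.replicate (n + 1) true).setIfInBounds 0 false).setIfInBounds 1
      false)[k]? = some (decide (2 ≤ k)) := by
    rcases Nat.lt_or_ge k 2 with h | h
    · interval_cases k <;> simp [Array.getElem?_setIfInBounds] <;> omega
    · rw [Array.getElem?_setIfInBounds, if_neg (by omega), Array.getElem?_setIfInBounds,
        if_neg (by omega), Array.getElem?_replicate, if_pos (by omega)]
      simp [h]
  by_cases hC : ∃ p ∈ List.range' 2 (n - 1), k ∈ List.range' (2 * p) (n / p - 1) p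
  · rw [if_pos ⟨hC, hsz⟩]
    obtain ⟨p, hpmem, hkmem⟩ := hC
    rw [List.mem_range'_1] at hpmem
    rw [pvMemInner n p k (by omega)] at hkmem
    obtain ⟨m, hm2, rfl, hle⟩ := hkmem
    have : ¬ Nat.Prime (p * m) := by
      intro hpr
      rcases hpr.eq_one_or_self_of_dvd p ⟨m, rfl⟩ with h | h
      · omega
      · nlinarith
    simp [this]
  · rw [if_neg (by intro h; exact hC h.1), hinit]
    rcases Nat.lt_or_ge k 2 with h2 | h2
    · have : ¬ Nat.Prime k := by interval_cases k <;> decide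
      simp [this]; omega
    · have hkpr : Nat.Prime k := by
        by_contra hnp
        obtain ⟨p, hdvd, hp2, hplt⟩ := Nat.exists_dvd_of_not_prime2 h2 hnp
        apply hC
        obtain ⟨m, rfl⟩ := hdvd
        refine ⟨p, ?_, ?_⟩
        · rw [List.mem_range'_1]; omega
        · rw [pvMemInner n p _ (by omega)]
          exact ⟨m, by nlinarith, rfl, hk⟩
      simp [hkpr, h2]

theorem pvFoldCount (l : List Bool) (s : Int) :
    l.foldl (fun s b => s + (if b then (1 : Int) else 0)) s = s + (l.countP id : Int) := by
  induction l generalizing s with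
  | nil => simp
  | cons b l ih =>
    rw [List.foldl_cons, ih, List.countP_cons]
    by_cases hb : b <;> simp [hb] <;> push_cast <;> ring

theorem pvSieve_toList (n : Nat) (hn : 1 ≤ n) :
    (pvSieve n).toList = (List.range (n + 1)).map (fun k => decide (Nat.Prime k)) := by
  apply List.ext_getElem?
  intro i
  rw [Array.getElem?_toList]
  rcases Nat.lt_or_ge i (n + 1) with h | h
  · rw [pvSieve_getElem? n i hn (by omega)]
    simp [List.getElem?_map, List.getElem?_range h]
  · rw [Array.getElem?_eq_none (by rw [pvSieve_size]; omega)]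
    rw [List.getElem?_eq_none (by simpa using h)]

theorem pvCount (n : Nat) (hn : 1 ≤ n) :
    (pvSieve n).foldl (fun s b => s + (if b then (1 : Int) else 0)) 0 = (pvPi (n + 1) : Int) := by
  rw [← Array.foldl_toList, pvFoldCount, pvSieve_toList n hn, List.countP_map]
  unfold pvPi
  simp

theorem pvSieve_getBang (n k : Nat) (hn : 1 ≤ n) (hk : k ≤ n) :
    (pvSieve n)[k]! = decide (Nat.Prime k) := by
  rw [Array.getElem!_eq_getD, Array.getD]
  split
  · next h =>
    have := pvSieve_getElem? n k hn hk
    rw [Array.getElem?_eq_getElem h] at this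
    simpa using this
  · next h => rw [pvSieve_size] at h; omega

-- ===== VERDICT (by name: the statement is the Claim_ definition above) =====
theorem get_prime_ordinal_pos_spec : Claim_equal_get_prime_ordinal_pos := by
  intro pn hdom hpre
  unfold Pre_get_prime_ordinal_pos at hpre
  unfold Spec_get_prime_ordinal_pos get_prime_ordinal_pos get_prime_ordinal_pos_alt
  rw [if_neg (by omega), if_neg (by omega)]
  simp only []
  have hn : 1 ≤ pn.toNat := by omega
  set n := pn.toNat with hndef
  rcases Nat.lt_or_ge n 2 with h2 | h2
  · have hn1 : n = 1 := by omega
    rw [hn1]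
    rw [pvSieve_getBang 1 1 (by omega) (by omega)]
    norm_num
    decide
  · rw [pvAloop_main n (by omega) (2 * n) 2 1 (by omega) h2 (by decide) (by omega)]
    rw [pvSieve_getBang n n (by omega) (by omega)]
    by_cases hpr : Nat.Prime n
    · rw [if_pos hpr]
      simp only [hpr, decide_true]
      rw [if_neg (by simp)]
      rw [pvCount n (by omega)]
    · rw [if_neg hpr]
      simp [hpr]
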